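-- pv_equiv track=rewrite | github.com/TanShets/TanShets | exp1.py | cost1
-- ===== SOURCE A (Python) =====
-- def mini(a):
--     mini1 = a[0]
--     for i in a:
--         if mini1 > i:
--             mini1 = i
--     return mini1
--
-- def cost1(a):
--     mini1 = mini(a)
--     sum1 = 0
--     for i in range(len(a)):
--         if a[i] != mini1:
--             sum1 += a[i]
--     sum1 += (len(a) - 2) * mini1
--     return sum1
-- ===== SOURCE B (Python) =====
-- def cost1(a):
--     s = sorted(a)
--     m = s[0]
--     rest = s
--     while rest and rest[0] == m:
--         rest = rest[1:]
--     return sum(rest) + (len(s) - 2) * m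
-- ===== Notes on version B (the rewrite author's own statement) =====
-- stated objective: alternative
-- what changed: Sort-then-scan: sorts the list, takes the minimum as the sorted head, strips the leading run of minima with a while loop, and returns the sum of the remaining suffix plus (n-2)*min, instead of A's hand-written min scan followed by a per-element filtered summation.
import Mathlib
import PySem

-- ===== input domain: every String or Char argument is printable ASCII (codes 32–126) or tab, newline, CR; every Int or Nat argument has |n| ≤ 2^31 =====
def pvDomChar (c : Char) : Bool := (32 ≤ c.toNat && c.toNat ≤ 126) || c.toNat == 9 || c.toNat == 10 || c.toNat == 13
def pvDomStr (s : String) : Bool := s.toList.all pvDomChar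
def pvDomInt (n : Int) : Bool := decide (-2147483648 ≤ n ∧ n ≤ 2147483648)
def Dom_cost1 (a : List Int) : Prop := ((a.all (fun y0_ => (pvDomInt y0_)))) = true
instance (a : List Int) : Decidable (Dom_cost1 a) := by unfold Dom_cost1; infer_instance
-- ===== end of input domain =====

-- B is a sort-then-scan alternative: sort, take the head as the minimum, strip the
-- leading run of minima, and sum the remaining suffix plus (n-2)*min.

-- ===== PORT A =====
-- mini(a): mini1 = a[0]; for i in a: if mini1 > i: mini1 = i
def mini (a : List Int) : Int :=
  a.foldl (fun mini1 i => if mini1 > i then i else mini1) (PySem.List.pyGetD a 0 0)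

def cost1 (a : List Int) : Int :=
  let mini1 := mini a
  let sum1 := (PySem.List.pyRange 0 (a.length : Int) 1).foldl
    (fun sum1 i => if PySem.List.pyGetD a i 0 ≠ mini1 then sum1 + PySem.List.pyGetD a i 0 else sum1) 0
  sum1 + ((a.length : Int) - 2) * mini1

-- ===== PORT B =====
-- while rest and rest[0] == m: rest = rest[1:]
def dropMinRun (m : Int) : List Int → List Int
  | [] => []
  | x :: xs => if x = m then dropMinRun m xs else x :: xs

def cost1_alt (a : List Int) : Int :=
  let s := PySem.List.sorted a (fun x => x) false
  match s with
  | [] => 0          -- unreachable: Pre_cost1 excludes [], where the Python raises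
  | m :: _ => (dropMinRun m s).sum + ((s.length : Int) - 2) * m

-- ===== PRECONDITION & SPEC =====
-- A raises IndexError on the empty list (its first indexing); B raises IndexError there too: excluded.
def Pre_cost1 (a : List Int) : Prop := a ≠ []
instance (a : List Int) : Decidable (Pre_cost1 a) := by unfold Pre_cost1; infer_instance
def pvWitness_cost1 : List Int := [3, 1, 2, 1]
def Spec_cost1 (a : List Int) (out : Int) : Prop := out = cost1_alt a
instance (a : List Int) (out : Int) : Decidable (Spec_cost1 a out) := by unfold Spec_cost1; infer_instance

-- ===== CLAIM (what is proved, stated in full; the proofs are below) =====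
def Claim_equal_cost1 : Prop := ∀ (a : List Int), Dom_cost1 a → Pre_cost1 a → Spec_cost1 a (cost1 a)

-- ===== LEMMAS AND PROOFS =====

-- A's conditional-sum loop by inclusion-exclusion over the whole list.
theorem filtered_sum_eq (m : Int) (a : List Int) (s0 : Int) :
    a.foldl (fun s v => if v ≠ m then s + v else s) s0
      = s0 + a.sum - (a.count m : Int) * m := by
  induction a generalizing s0 with
  | nil => simp
  | cons x xs ih =>
    rw [List.foldl_cons]
    by_cases hx : x = m
    · rw [if_neg (by simp [hx]), ih, List.count_cons, if_pos (by simp [hx])]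
      subst hx
      simp only [List.sum_cons]
      push_cast
      ring
    · rw [if_pos hx, ih, List.count_cons, if_neg (by simp [hx])]
      simp only [List.sum_cons]
      push_cast
      ring

theorem mini_eq_foldl_min (x : Int) (xs : List Int) :
    mini (x :: xs) = xs.foldl min x := by
  unfold mini
  simp only [PySem.List.pyGetD, PySem.List.pyGet?]
  have hf : (fun (mini1 i : Int) => if mini1 > i then i else mini1) = min := by
    funext m i
    simp [min_def]
    omega
  simp [List.foldl_cons, hf, PySem.List.pyIdx?]

theorem foldl_min_mem (x : Int) (xs : List Int) : xs.foldl min x ∈ x :: xs := by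
  induction xs generalizing x with
  | nil => simp
  | cons y ys ih =>
    rw [List.foldl_cons]
    rcases List.mem_cons.mp (ih (min x y)) with h | h
    · rw [h]
      rcases le_total x y with hxy | hxy
      · simp [min_eq_left hxy]
      · simp [min_eq_right hxy]
    · simp [List.mem_cons, h]

theorem foldl_min_le (x : Int) (xs : List Int) :
    ∀ y ∈ x :: xs, xs.foldl min x ≤ y := by
  induction xs generalizing x with
  | nil => simp
  | cons z zs ih =>
    intro y hy
    rw [List.foldl_cons]
    have hx : zs.foldl min (min x z) ≤ min x z := ih (min x z) (min x z) (by simp)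
    rcases List.mem_cons.mp hy with rfl | hy2
    · exact le_trans hx (min_le_left _ _)
    rcases List.mem_cons.mp hy2 with rfl | hy3
    · exact le_trans hx (min_le_right _ _)
    · exact ih (min x z) y (by simp [hy3])

-- In a ≤-sorted list whose elements are all ≥ m, stripping the leading run of m's
-- removes exactly the m's.
theorem dropMinRun_sum (m : Int) (s : List Int)
    (hs : s.Pairwise (· ≤ ·)) (hlb : ∀ y ∈ s, m ≤ y) :
    (dropMinRun m s).sum = s.sum - (s.count m : Int) * m := by
  induction s with
  | nil => simp [dropMinRun]
  | cons x xs ih =>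
    rw [List.pairwise_cons] at hs
    by_cases hx : x = m
    · subst hx
      rw [dropMinRun, if_pos rfl, ih hs.2 (fun y hy => hlb y (by simp [hy]))]
      simp only [List.sum_cons, List.count_cons_self]
      push_cast
      ring
    · have hxm : m < x := lt_of_le_of_ne (hlb x (by simp)) (Ne.symm hx)
      have hcx : xs.count m = 0 := by
        rw [List.count_eq_zero]
        intro hmem
        exact absurd (hs.1 m hmem) (not_le.mpr hxm)
      rw [dropMinRun, if_neg hx]
      simp [hcx, hx]

-- ===== VERDICT (by name: the statement is the Claim_ definition above) =====
theorem cost1_spec : Claim_equal_cost1 := by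
  intro a _ hpre
  obtain ⟨x, xs, rfl⟩ := List.exists_cons_of_ne_nil hpre
  unfold Spec_cost1 cost1 cost1_alt
  dsimp only
  -- name the sorted list and its head
  have hsne : PySem.List.sorted (x :: xs) (fun y => y) false ≠ [] := by
    simp [PySem.List.sorted_eq_nil_iff]
  obtain ⟨h, t, hst⟩ := List.exists_cons_of_ne_nil hsne
  have hperm : (PySem.List.sorted (x :: xs) (fun y => y) false).Perm (x :: xs) :=
    PySem.List.sorted_perm _ _ _
  -- the sorted head is the minimum computed by A's mini
  have hmem : h ∈ x :: xs := hperm.mem_iff.mp (by rw [hst]; simp)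
  have hle : ∀ y ∈ x :: xs, h ≤ y := by
    have := PySem.List.key_head_sorted_le _ _ hst
    simpa using this
  have hmini : mini (x :: xs) = h := by
    rw [mini_eq_foldl_min]
    exact le_antisymm (foldl_min_le x xs h hmem) (hle _ (foldl_min_mem x xs))
  -- B's scan over the sorted list
  have hpw : (PySem.List.sorted (x :: xs) (fun y => y) false).Pairwise (· ≤ ·) := by
    have := PySem.List.sorted_pairwise (xs := x :: xs) (key := fun y => y)
    simpa using this
  have hlb : ∀ y ∈ PySem.List.sorted (x :: xs) (fun y => y) false, h ≤ y := by
    intro y hy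
    exact hle y (hperm.mem_iff.mp hy)
  have hB := dropMinRun_sum h _ hpw hlb
  -- A's loop over indices = fold over the list
  rw [PySem.List.foldl_pyRange_zero_pyGetD' (x :: xs) 0
        (fun s v => if v ≠ mini (x :: xs) then s + v else s) 0]
  rw [filtered_sum_eq, hmini]
  simp only [hst] at hB ⊢
  rw [hB]
  have hsum : (h :: t).sum = (x :: xs).sum := by
    have := hperm.sum_eq; rwa [hst] at this
  have hcnt : (h :: t).count h = (x :: xs).count h := by
    have := hperm.count_eq h; rwa [hst] at this
  have hlen : (h :: t).length = (x :: xs).length := by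
    have := hperm.length_eq; rwa [hst] at this
  rw [hsum, hcnt, hlen]
  ring
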